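-- pv_equiv track=rewrite | github.com/HEPHZIBAI/160-Days-of-Daily-Problem-Solving | 16.greedy/greedy bonus/Police and Thieves.py | catchThieves
-- ===== SOURCE A (Python) =====
-- def catchThieves(arr, k):
--     n=len(arr)
--     i,j=0,0
--     c=0
--
--     while i<n and j<n:
--         while i<n and arr[i]!='P':
--             i+=1
--
--         while j<n and arr[j]!='T':
--             j+=1
--
--         if i<n and j<n and abs(i-j)<=k:
--             c+=1
--             i+=1
--             j+=1
--         elif j<n and j<i:
--             j+=1
--         elif i<n and i<j:
--             i+=1
--
--     return c
-- ===== SOURCE B (Python) =====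
-- def catchThieves(arr, k):
--     pending_p = []
--     pending_t = []
--     c = 0
--     for i, x in enumerate(arr):
--         if x == 'P':
--             while pending_t and i - pending_t[0] > k:
--                 pending_t.pop(0)
--             if pending_t:
--                 pending_t.pop(0)
--                 c += 1
--             else:
--                 pending_p.append(i)
--         elif x == 'T':
--             while pending_p and i - pending_p[0] > k:
--                 pending_p.pop(0)
--             if pending_p:
--                 pending_p.pop(0)
--                 c += 1
--             else:
--                 pending_t.append(i)
--     return c
-- ===== Notes on version B (the rewrite author's own statement) =====
-- stated objective: alternative
-- what changed: B replaces A's two-cursor skip-scan over the array by a single left-to-right pass that maintains queues of pending unmatched police and thief indices, matching each arrival with the earliest live pending opposite and lazily discarding expired entries.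
import Mathlib
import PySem

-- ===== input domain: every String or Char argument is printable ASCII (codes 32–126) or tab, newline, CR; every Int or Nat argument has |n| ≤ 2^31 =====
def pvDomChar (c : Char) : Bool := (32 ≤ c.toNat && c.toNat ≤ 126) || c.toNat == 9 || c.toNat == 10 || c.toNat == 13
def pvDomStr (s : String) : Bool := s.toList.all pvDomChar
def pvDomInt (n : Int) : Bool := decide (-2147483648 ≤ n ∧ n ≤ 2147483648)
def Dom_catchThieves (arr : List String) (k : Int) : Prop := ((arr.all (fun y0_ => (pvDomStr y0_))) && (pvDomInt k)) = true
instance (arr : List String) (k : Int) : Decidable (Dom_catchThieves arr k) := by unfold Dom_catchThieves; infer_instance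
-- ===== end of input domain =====

-- B replaces A's two-cursor skip-scan with a single left-to-right pass keeping queues of
-- pending unmatched police/thief indices, matching each arrival with the earliest live
-- pending opposite (objective: alternative).


-- ===== PORT A =====
-- inner 'while i<n and arr[i]!=s: i+=1' loops of A (indices start at 0 and only grow, so Nat)
def skipTo (arr : List String) (s : String) (i : Nat) : Nat :=
  if i < arr.length then
    (if arr.getD i "" ≠ s then skipTo arr s (i + 1) else i)
  else i
termination_by arr.length - i

theorem skipTo_ge (arr : List String) (s : String) (i : Nat) : i ≤ skipTo arr s i := by
  unfold skipTo
  split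
  · split
    · exact Nat.le_trans (Nat.le_succ i) (skipTo_ge arr s (i + 1))
    · exact Nat.le_refl i
  · exact Nat.le_refl i
termination_by arr.length - i

-- A's outer while loop, step for step
def loopA (arr : List String) (k : Int) (i j : Nat) (c : Int) : Int :=
  if i < arr.length ∧ j < arr.length then
    let i' := skipTo arr "P" i
    let j' := skipTo arr "T" j
    if i' < arr.length ∧ j' < arr.length ∧ |(i' : Int) - (j' : Int)| ≤ k then
      loopA arr k (i' + 1) (j' + 1) (c + 1)
    else if j' < arr.length ∧ j' < i' then
      loopA arr k i' (j' + 1) c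
    else if i' < arr.length ∧ i' < j' then
      loopA arr k (i' + 1) j' c
    else c
  else c
termination_by (arr.length - i) + (arr.length - j)
decreasing_by
  · have h1 := skipTo_ge arr "P" i
    have h2 := skipTo_ge arr "T" j
    omega
  · have h1 := skipTo_ge arr "P" i
    have h2 := skipTo_ge arr "T" j
    omega
  · have h1 := skipTo_ge arr "P" i
    have h2 := skipTo_ge arr "T" j
    omega

def catchThieves (arr : List String) (k : Int) : Int := loopA arr k 0 0 0

-- ===== PORT B =====
-- Source B's 'enumerate(arr)'
def enumFrom (n : Nat) : List String → List (Nat × String)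
  | [] => []
  | x :: xs => (n, x) :: enumFrom (n + 1) xs

-- Source B's inner 'while pending and i - pending[0] > k: pending.pop(0)'
def dropExpired (k : Int) (i : Nat) : List Nat → List Nat
  | [] => []
  | p :: ps => if (i : Int) - (p : Int) > k then dropExpired k i ps else p :: ps

-- one iteration of Source B's for-loop body; state = (pending_p, pending_t, c)
def stepB (k : Int) (st : List Nat × List Nat × Int) (ix : Nat × String) : List Nat × List Nat × Int :=
  if ix.2 == "P" then
    match dropExpired k ix.1 st.2.1 with
    | _ :: rest => (st.1, rest, st.2.2 + 1)
    | [] => (st.1 ++ [ix.1], [], st.2.2)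
  else if ix.2 == "T" then
    match dropExpired k ix.1 st.1 with
    | _ :: rest => (rest, st.2.1, st.2.2 + 1)
    | [] => ([], st.2.1 ++ [ix.1], st.2.2)
  else st

def catchThieves_alt (arr : List String) (k : Int) : Int :=
  ((enumFrom 0 arr).foldl (stepB k) ([], [], 0)).2.2

-- ===== PRECONDITION & SPEC =====
def Spec_catchThieves (arr : List String) (k : Int) (out : Int) : Prop := out = catchThieves_alt arr k
instance (arr : List String) (k : Int) (out : Int) : Decidable (Spec_catchThieves arr k out) := by unfold Spec_catchThieves; infer_instance

-- ===== CLAIM (what is proved, stated in full; the proofs are below) =====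
def Claim_equal_catchThieves : Prop := ∀ (arr : List String) (k : Int), Dom_catchThieves arr k → Spec_catchThieves arr k (catchThieves arr k)

-- ===== LEMMAS AND PROOFS =====

-- common yardstick for both ports: greedy merge over the two index lists
def mergeB (k : Int) : List Nat → List Nat → Int → Int
  | p :: ps, t :: ts, c =>
    if |(p : Int) - (t : Int)| ≤ k then mergeB k ps ts (c + 1)
    else if p < t then mergeB k ps (t :: ts) c
    else mergeB k (p :: ps) ts c
  | _, _, c => c
termination_by ps ts _ => ps.length + ts.length

theorem mergeB_nil_left (k : Int) (l : List Nat) (c : Int) : mergeB k [] l c = c := by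
  cases l <;> simp [mergeB]

theorem mergeB_nil_right (k : Int) (l : List Nat) (c : Int) : mergeB k l [] c = c := by
  cases l <;> simp [mergeB]

-- indices ≥ n (within suffix l of the array) holding s
def pIdx (s : String) (n : Nat) : List String → List Nat
  | [] => []
  | x :: xs => if x = s then n :: pIdx s (n + 1) xs else pIdx s (n + 1) xs

-- the still-unscanned matching indices of arr from position i
def idxFrom (arr : List String) (s : String) (i : Nat) : List Nat := pIdx s i (arr.drop i)

theorem idxFrom_zero (arr : List String) (s : String) : idxFrom arr s 0 = pIdx s 0 arr := by
  simp [idxFrom]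

theorem idxFrom_unfold (arr : List String) (s : String) (i : Nat) (h : i < arr.length) :
    idxFrom arr s i =
      (if arr.getD i "" = s then i :: idxFrom arr s (i + 1) else idxFrom arr s (i + 1)) := by
  unfold idxFrom
  rw [List.drop_eq_getElem_cons h, pIdx, List.getD_eq_getElem arr "" h]

theorem idxFrom_nil (arr : List String) (s : String) (i : Nat) (h : arr.length ≤ i) :
    idxFrom arr s i = [] := by
  unfold idxFrom
  rw [List.drop_eq_nil_of_le h]
  rfl

theorem idxFrom_head_eq (arr : List String) (s : String) (i p : Nat) (ps : List Nat)
    (hi : i ≤ arr.length) (he : idxFrom arr s i = p :: ps) : arr.getD p "" = s := by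
  by_cases h : i < arr.length
  · rw [idxFrom_unfold arr s i h] at he
    split_ifs at he with hs
    · obtain ⟨rfl, rfl⟩ := by simpa using he
      exact hs
    · exact idxFrom_head_eq arr s (i + 1) p ps (by omega) he
  · rw [idxFrom_nil arr s i (by omega)] at he
    simp at he
termination_by arr.length - i

theorem idxFrom_head_tail (arr : List String) (s : String) (i p : Nat) (ps : List Nat)
    (h : i ≤ arr.length) (he : idxFrom arr s i = p :: ps) :
    i ≤ p ∧ p < arr.length ∧ idxFrom arr s (p + 1) = ps := by
  by_cases hi : i < arr.length
  · rw [idxFrom_unfold arr s i hi] at he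
    split_ifs at he with hs
    · obtain ⟨rfl, rfl⟩ := by simpa using he
      exact ⟨Nat.le_refl _, hi, rfl⟩
    · have := idxFrom_head_tail arr s (i + 1) p ps (by omega) he
      exact ⟨by omega, this.2.1, this.2.2⟩
  · rw [idxFrom_nil arr s i (by omega)] at he
    simp at he
termination_by arr.length - i

theorem skipTo_le (arr : List String) (s : String) (i : Nat) (h : i ≤ arr.length) :
    skipTo arr s i ≤ arr.length := by
  unfold skipTo
  split
  · split
    · exact skipTo_le arr s (i + 1) (by omega)
    · omega
  · omega
termination_by arr.length - i

-- skipTo reaches the head of idxFrom (or n when there is none)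
theorem skipTo_eq_headD (arr : List String) (s : String) (i : Nat) (h : i ≤ arr.length) :
    skipTo arr s i = (idxFrom arr s i).headD arr.length := by
  by_cases hi : i < arr.length
  · rw [idxFrom_unfold arr s i hi]
    by_cases hs : arr.getD i "" = s
    · rw [if_pos hs, skipTo, if_pos hi, if_neg (not_not_intro hs)]
      simp
    · rw [if_neg hs, skipTo, if_pos hi, if_pos hs]
      exact skipTo_eq_headD arr s (i + 1) (by omega)
  · rw [idxFrom_nil arr s i (by omega), skipTo, if_neg hi]
    simp
    omega
termination_by arr.length - i

-- A-side invariant: A's loop from (i, j) computes the merge over the remaining index lists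
theorem loop_eq (arr : List String) (k : Int) :
    ∀ m i j c, (arr.length - i) + (arr.length - j) ≤ m → i ≤ arr.length → j ≤ arr.length →
      loopA arr k i j c = mergeB k (idxFrom arr "P" i) (idxFrom arr "T" j) c := by
  intro m
  induction m with
  | zero =>
    intro i j c hm hi hj
    rw [loopA, if_neg (by omega), idxFrom_nil arr "P" i (by omega), mergeB_nil_left]
  | succ m ih =>
    intro i j c hm hi hj
    rw [loopA]
    by_cases hcond : i < arr.length ∧ j < arr.length
    · rw [if_pos hcond]
      simp only []
      have hip := skipTo_eq_headD arr "P" i hi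
      have hjt := skipTo_eq_headD arr "T" j hj
      have hige := skipTo_ge arr "P" i
      have hjge := skipTo_ge arr "T" j
      have hile := skipTo_le arr "P" i hi
      have hjle := skipTo_le arr "T" j hj
      cases hP : idxFrom arr "P" i with
      | nil =>
        have hin : skipTo arr "P" i = arr.length := by rw [hip, hP]; rfl
        rw [mergeB_nil_left, if_neg (by omega)]
        by_cases hjn : skipTo arr "T" j < arr.length
        · rw [if_pos ⟨hjn, by omega⟩]
          rw [ih (skipTo arr "P" i) (skipTo arr "T" j + 1) c (by omega) (by omega) (by omega)]
          rw [hin, idxFrom_nil arr "P" _ (Nat.le_refl _), mergeB_nil_left]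
        · rw [if_neg (by omega), if_neg (by omega)]
      | cons p ps =>
        obtain ⟨hip2, hplt, hPtail⟩ := idxFrom_head_tail arr "P" i p ps hi hP
        have hin : skipTo arr "P" i = p := by rw [hip, hP]; rfl
        cases hT : idxFrom arr "T" j with
        | nil =>
          have hjn : skipTo arr "T" j = arr.length := by rw [hjt, hT]; rfl
          rw [mergeB_nil_right, if_neg (by omega), if_neg (by omega)]
          by_cases hilt : skipTo arr "P" i < skipTo arr "T" j
          · rw [if_pos ⟨by omega, hilt⟩]
            rw [ih (skipTo arr "P" i + 1) (skipTo arr "T" j) c (by omega) (by omega) (by omega)]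
            rw [hjn, idxFrom_nil arr "T" _ (Nat.le_refl _), mergeB_nil_right]
          · omega
        | cons t ts =>
          obtain ⟨hjt2, htlt, hTtail⟩ := idxFrom_head_tail arr "T" j t ts hj hT
          have hjn : skipTo arr "T" j = t := by rw [hjt, hT]; rfl
          rw [hin, hjn, mergeB]
          by_cases habs : |(p : Int) - (t : Int)| ≤ k
          · rw [if_pos ⟨hplt, htlt, habs⟩, if_pos habs]
            rw [ih (p + 1) (t + 1) (c + 1) (by omega) (by omega) (by omega)]
            rw [hPtail, hTtail]
          · rw [if_neg (by simp only [not_and_or]; right; right; exact habs), if_neg habs]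
            have h1 := idxFrom_head_eq arr "P" i p ps hi hP
            have h2 := idxFrom_head_eq arr "T" j t ts hj hT
            have hne : p ≠ t := by
              intro hpe
              rw [hpe, h2] at h1
              simp at h1
            have hPat : idxFrom arr "P" p = p :: ps := by
              rw [idxFrom_unfold arr "P" p hplt, if_pos h1, hPtail]
            have hTat : idxFrom arr "T" t = t :: ts := by
              rw [idxFrom_unfold arr "T" t htlt, if_pos h2, hTtail]
            by_cases hpt : p < t
            · rw [if_neg (by omega), if_pos ⟨hplt, hpt⟩, if_pos hpt]
              rw [ih (p + 1) t c (by omega) (by omega) (by omega)]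
              rw [hPtail, hTat]
            · rw [if_pos ⟨htlt, by omega⟩, if_neg hpt]
              rw [ih p (t + 1) c (by omega) (by omega) (by omega)]
              rw [hPat, hTtail]
    · rw [if_neg hcond]
      by_cases hi0 : i < arr.length
      · rw [idxFrom_nil arr "T" j (by omega), mergeB_nil_right]
      · rw [idxFrom_nil arr "P" i (by omega), mergeB_nil_left]

-- ===== B-side lemmas =====

theorem mem_dropExpired (k : Int) (i : Nat) (l : List Nat) (p : Nat)
    (h : p ∈ dropExpired k i l) : p ∈ l := by
  induction l with
  | nil => simp [dropExpired] at h
  | cons q qs ih =>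
    rw [dropExpired] at h
    split_ifs at h with hq
    · exact List.mem_cons_of_mem q (ih h)
    · exact h

theorem abs_sub_of_lt (p t : Nat) (h : p < t) : |(p : Int) - (t : Int)| = (t : Int) - (p : Int) := by
  rw [abs_sub_comm]
  exact abs_of_nonneg (by omega)

-- a thief event t against the pending police queue: merge drops exactly the expired prefix
theorem mergeB_pendP (k : Int) (t : Nat) (pend P T : List Nat) (c : Int)
    (h : ∀ p ∈ pend, p < t) :
    mergeB k (pend ++ P) (t :: T) c =
      (match dropExpired k t pend with
       | [] => mergeB k P (t :: T) c
       | _ :: rest => mergeB k (rest ++ P) T (c + 1)) := by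
  induction pend generalizing c with
  | nil => simp [dropExpired]
  | cons q qs ih =>
    have hq : q < t := h q List.mem_cons_self
    have habs := abs_sub_of_lt q t hq
    rw [List.cons_append, mergeB, dropExpired]
    by_cases hexp : (t : Int) - (q : Int) > k
    · rw [if_neg (by omega), if_pos hq, if_pos hexp]
      exact ih c (fun p hp => h p (List.mem_cons_of_mem q hp))
    · rw [if_pos (by omega), if_neg hexp]

-- a police event e against the pending thief queue, mirror-wise
theorem mergeB_pendT (k : Int) (e : Nat) (pend P T : List Nat) (c : Int)
    (h : ∀ p ∈ pend, p < e) :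
    mergeB k (e :: P) (pend ++ T) c =
      (match dropExpired k e pend with
       | [] => mergeB k (e :: P) T c
       | _ :: rest => mergeB k P (rest ++ T) (c + 1)) := by
  induction pend generalizing c with
  | nil => simp [dropExpired]
  | cons q qs ih =>
    have hq : q < e := h q List.mem_cons_self
    have habs : |(e : Int) - (q : Int)| = (e : Int) - (q : Int) := abs_of_nonneg (by omega)
    rw [List.cons_append, mergeB, dropExpired]
    by_cases hexp : (e : Int) - (q : Int) > k
    · rw [if_neg (by omega), if_neg (by omega), if_pos hexp]
      exact ih c (fun p hp => h p (List.mem_cons_of_mem q hp))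
    · rw [if_pos (by omega), if_neg hexp]

-- B-side invariant: folding the step over the remaining events, with one pending queue
-- (all entries earlier than every remaining event), computes the merge over the index lists
theorem fold_eq_mergeB (k : Int) :
    ∀ (l : List String) (n : Nat) (pend : List Nat) (c : Int), (∀ p ∈ pend, p < n) →
      (((enumFrom n l).foldl (stepB k) (pend, [], c)).2.2
          = mergeB k (pend ++ pIdx "P" n l) (pIdx "T" n l) c)
      ∧ (((enumFrom n l).foldl (stepB k) ([], pend, c)).2.2
          = mergeB k (pIdx "P" n l) (pend ++ pIdx "T" n l) c) := by
  intro l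
  induction l with
  | nil =>
    intro n pend c hp
    simp [enumFrom, pIdx, mergeB_nil_left, mergeB_nil_right]
  | cons x xs ih =>
    intro n pend c hp
    have hsucc : ∀ p ∈ pend, p < n + 1 := fun p hp' => Nat.lt_succ_of_lt (hp p hp')
    rw [enumFrom]
    by_cases hxP : x = "P"
    · have hPl : pIdx "P" n (x :: xs) = n :: pIdx "P" (n + 1) xs := by
        rw [pIdx, if_pos hxP]
      have hTl : pIdx "T" n (x :: xs) = pIdx "T" (n + 1) xs := by
        rw [pIdx, if_neg (by simp [hxP])]
      constructor
      · -- pending police, event is a police: just append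
        rw [List.foldl_cons]
        have hstep : stepB k (pend, [], c) (n, x) = (pend ++ [n], [], c) := by
          simp [stepB, hxP, dropExpired]
        rw [hstep, (ih (n + 1) (pend ++ [n]) c (by
          intro p hp'
          rcases List.mem_append.mp hp' with h1 | h1
          · exact Nat.lt_succ_of_lt (hp p h1)
          · simp at h1; omega)).1]
        rw [hPl, hTl]
        simp
      · -- pending thieves, event is a police: match or flip the queue
        rw [List.foldl_cons]
        have hstepeq : stepB k ([], pend, c) (n, x) =
            (match dropExpired k n pend with
             | _ :: rest => ([], rest, c + 1)
             | [] => ([n], [], c)) := by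
          simp only [stepB, hxP]
          cases dropExpired k n pend <;> simp
        rw [hstepeq]
        have hmerge := mergeB_pendT k n pend (pIdx "P" (n + 1) xs) (pIdx "T" (n + 1) xs) c hp
        cases hd : dropExpired k n pend with
        | nil =>
          simp only [hd] at hmerge ⊢
          rw [(ih (n + 1) [n] c (by intro p hp'; simp at hp'; omega)).1]
          rw [hPl, hTl, hmerge, List.singleton_append]
        | cons q rest =>
          simp only [hd] at hmerge ⊢
          rw [(ih (n + 1) rest (c + 1) (fun p hp' =>
            Nat.lt_succ_of_lt (hp p (mem_dropExpired k n pend p (hd ▸ List.mem_cons_of_mem q hp'))))).2]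
          rw [hPl, hTl, hmerge]
    · by_cases hxT : x = "T"
      · have hPl : pIdx "P" n (x :: xs) = pIdx "P" (n + 1) xs := by
          rw [pIdx, if_neg (by simp [hxT])]
        have hTl : pIdx "T" n (x :: xs) = n :: pIdx "T" (n + 1) xs := by
          rw [pIdx, if_pos hxT]
        constructor
        · -- pending police, event is a thief: match or flip the queue
          rw [List.foldl_cons]
          have hstepeq : stepB k (pend, [], c) (n, x) =
              (match dropExpired k n pend with
               | _ :: rest => (rest, [], c + 1)
               | [] => ([], [n], c)) := by
            simp only [stepB, hxT]
            rw [if_neg (by decide)]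
            cases dropExpired k n pend <;> simp
          rw [hstepeq]
          have hmerge := mergeB_pendP k n pend (pIdx "P" (n + 1) xs) (pIdx "T" (n + 1) xs) c hp
          cases hd : dropExpired k n pend with
          | nil =>
            simp only [hd] at hmerge ⊢
            rw [(ih (n + 1) [n] c (by intro p hp'; simp at hp'; omega)).2]
            rw [hPl, hTl, hmerge, List.singleton_append]
          | cons q rest =>
            simp only [hd] at hmerge ⊢
            rw [(ih (n + 1) rest (c + 1) (fun p hp' =>
              Nat.lt_succ_of_lt (hp p (mem_dropExpired k n pend p (hd ▸ List.mem_cons_of_mem q hp'))))).1]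
            rw [hPl, hTl, hmerge]
        · -- pending thieves, event is a thief: just append
          rw [List.foldl_cons]
          have hstep : stepB k ([], pend, c) (n, x) = ([], pend ++ [n], c) := by
            simp [stepB, hxT, dropExpired]
          rw [hstep, (ih (n + 1) (pend ++ [n]) c (by
            intro p hp'
            rcases List.mem_append.mp hp' with h1 | h1
            · exact Nat.lt_succ_of_lt (hp p h1)
            · simp at h1; omega)).2]
          rw [hPl, hTl]
          simp
      · -- irrelevant character: state unchanged
        have hPl : pIdx "P" n (x :: xs) = pIdx "P" (n + 1) xs := by
          rw [pIdx, if_neg hxP]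
        have hTl : pIdx "T" n (x :: xs) = pIdx "T" (n + 1) xs := by
          rw [pIdx, if_neg hxT]
        have hstep1 : stepB k (pend, [], c) (n, x) = (pend, [], c) := by
          simp [stepB, hxP, hxT]
        have hstep2 : stepB k ([], pend, c) (n, x) = ([], pend, c) := by
          simp [stepB, hxP, hxT]
        rw [List.foldl_cons, List.foldl_cons, hstep1, hstep2, hPl, hTl]
        exact ih (n + 1) pend c hsucc

-- ===== VERDICT (by name: the statement is the Claim_ definition above) =====
theorem catchThieves_spec : Claim_equal_catchThieves := by
  intro arr k _
  unfold Spec_catchThieves catchThieves catchThieves_alt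
  rw [loop_eq arr k (arr.length + arr.length) 0 0 0 (by omega) (by omega) (by omega)]
  rw [idxFrom_zero, idxFrom_zero]
  have := (fold_eq_mergeB k arr 0 [] 0 (by simp)).1
  rw [this]
  rfl
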